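-- pv_equiv track=rewrite | github.com/AbinayaSwaminathan/CodeSignal | quora/subarr/subarr.py | solution
-- ===== SOURCE A (Python) =====
-- from collections import defaultdict
--
-- def solution(arr):
--     N=len(arr)
--     cntSub = 0
--     cntUnique = 0
--     cntFreq = defaultdict(lambda : 0)
--     for i in range(N):
--         for j in range(i, N):
--             cntFreq[arr[j]] += 1
--             if (cntFreq[arr[j]] == 1):
--                 cntUnique += 1
--             elif (cntFreq[arr[j]] == 2):
--                 cntUnique -= 1
--             if (cntUnique == 0):
--                 cntSub += 1
--         cntFreq.clear()
--         cntUnique = 0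
--     return cntSub
-- ===== SOURCE B (Python) =====
-- from collections import Counter
--
-- def solution(arr):
--     n = len(arr)
--     return sum(
--         1
--         for i in range(n)
--         for j in range(i, n)
--         if all(c >= 2 for c in Counter(arr[i:j + 1]).values())
--     )
-- ===== Notes on version B (the rewrite author's own statement) =====
-- stated objective: simpler
-- what changed: Replaces A's incrementally maintained frequency dict and running unique-count across the inner loop by a stateless comprehension that rebuilds a fresh Counter for each subarray and tests all counts >= 2.
import Mathlib
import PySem

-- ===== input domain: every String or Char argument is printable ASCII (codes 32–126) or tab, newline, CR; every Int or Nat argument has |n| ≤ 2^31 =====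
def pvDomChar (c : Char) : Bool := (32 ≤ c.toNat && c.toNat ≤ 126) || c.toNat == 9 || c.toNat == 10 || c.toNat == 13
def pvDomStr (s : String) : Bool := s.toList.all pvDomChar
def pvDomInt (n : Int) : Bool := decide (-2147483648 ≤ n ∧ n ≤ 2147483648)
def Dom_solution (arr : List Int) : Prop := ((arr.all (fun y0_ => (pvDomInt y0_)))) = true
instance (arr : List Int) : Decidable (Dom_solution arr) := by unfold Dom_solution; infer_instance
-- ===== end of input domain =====

-- B replaces A's incrementally maintained frequency dict and running unique-count by a
-- stateless comprehension rebuilding a fresh Counter per subarray (simpler, not faster).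


-- ===== PORT A =====
-- one inner-loop iteration of A: state (cntFreq, cntUnique, cntSub), element arr[j]
def stepA (st : PySem.Dict Int Int × Int × Int) (x : Int) : PySem.Dict Int Int × Int × Int :=
  let freq := st.1.modify x 0 (· + 1)          -- cntFreq[arr[j]] += 1  (defaultdict 0)
  let c := freq.getD x 0
  let unique := if c = 1 then st.2.1 + 1 else if c = 2 then st.2.1 - 1 else st.2.1
  let sub := if unique = 0 then st.2.2 + 1 else st.2.2
  (freq, unique, sub)

def solution (arr : List Int) : Int :=
  (PySem.List.pyRange 0 (arr.length : Int) 1).foldl (fun cntSub i =>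
    ((PySem.List.pyRange i (arr.length : Int) 1).foldl
        (fun st j => stepA st (PySem.List.pyGetD arr j 0))
        (PySem.Dict.empty, 0, cntSub)).2.2) 0

-- ===== PORT B =====
def solution_alt (arr : List Int) : Int :=
  ((PySem.List.pyRange 0 (arr.length : Int) 1).map (fun i =>
    ((PySem.List.pyRange i (arr.length : Int) 1).map (fun j =>
      if ((PySem.Dict.counter (PySem.List.slice arr (some i) (some (j + 1)))).values.all
            (fun c => 2 ≤ c))
      then (1 : Int) else 0)).sum)).sum

-- ===== PRECONDITION & SPEC =====
def Spec_solution (arr : List Int) (out : Int) : Prop := out = solution_alt arr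
instance (arr : List Int) (out : Int) : Decidable (Spec_solution arr out) := by unfold Spec_solution; infer_instance

-- ===== CLAIM (what is proved, stated in full; the proofs are below) =====
def Claim_equal_solution : Prop := ∀ (arr : List Int), Dom_solution arr → Spec_solution arr (solution arr)

-- ===== LEMMAS AND PROOFS =====

-- number of values occurring exactly once in u (the meaning of A's cntUnique)
def uq (u : List Int) : Int := ((u.filter (fun y => u.count y = 1)).length : Int)

theorem countP_congr_except (p : List Int) (q q0 : Int → Bool) (x : Int)
    (h : ∀ y, y ≠ x → q y = q0 y) :
    (p.countP q : Int) =
      (p.countP q0 : Int) +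
        (p.count x : Int) * ((if q x then 1 else 0) - (if q0 x then 1 else 0)) := by
  induction p with
  | nil => simp
  | cons a p ih =>
    by_cases hax : a = x
    · subst hax
      simp only [List.countP_cons, List.count_cons_self]
      by_cases hq : q a <;> by_cases hq0 : q0 a <;>
        simp [hq, hq0] at ih ⊢ <;> push_cast <;> linarith [ih]
    · have := h a hax
      simp only [List.countP_cons, List.count_cons_of_ne hax]
      by_cases hq : q a <;> simp only [hq, ← this, if_true, if_false] <;>
        push_cast <;> linarith [ih]

theorem uq_append (p : List Int) (x : Int) :
    uq (p ++ [x]) =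
      uq p + (if (p ++ [x]).count x = 1 then 1
              else if (p ++ [x]).count x = 2 then -1 else 0) := by
  have hc : ∀ y, (p ++ [x]).count y = p.count y + (if y = x then 1 else 0) := by
    intro y; rw [List.count_append, List.count_singleton']
    by_cases hy : y = x
    · simp [hy]
    · rw [if_neg (fun h => hy h.symm), if_neg hy]
  have hcx : (p ++ [x]).count x = p.count x + 1 := by rw [hc]; simp
  have hkey := countP_congr_except p
      (fun y => decide ((p ++ [x]).count y = 1))
      (fun y => decide (p.count y = 1)) x
      (by intro y hy; simp only [hc y, if_neg hy, Nat.add_zero])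
  unfold uq
  rw [← List.countP_eq_length_filter, ← List.countP_eq_length_filter, List.countP_append]
  push_cast
  rw [hkey]
  rcases hn : p.count x with _ | n
  · simp [hcx, hn]
  · rcases n with _ | m
    · simp [hcx, hn]
    · have h1 : ¬ ((p ++ [x]).count x = 1) := by omega
      have h2 : ¬ ((p ++ [x]).count x = 2) := by omega
      simp [hcx, hn]

-- one step of A's inner loop, described on the processed-prefix level
theorem stepA_eq (p : List Int) (s : Int) (x : Int) :
    stepA (PySem.Dict.counter p, uq p, s) x =
      (PySem.Dict.counter (p ++ [x]), uq (p ++ [x]),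
        s + (if uq (p ++ [x]) = 0 then 1 else 0)) := by
  unfold stepA
  have hctr : (PySem.Dict.counter p).modify x 0 (· + 1) = PySem.Dict.counter (p ++ [x]) :=
    (PySem.Dict.counter_append_singleton p x).symm
  have hgd : (PySem.Dict.counter (p ++ [x])).getD x 0 = ((p ++ [x]).count x : Int) :=
    PySem.Dict.getD_counter _ _
  have huq := uq_append p x
  simp only [hctr, hgd, huq]
  have h1 : (((p ++ [x]).count x : Int) = 1) ↔ ((p ++ [x]).count x = 1) := by omega
  have h2 : (((p ++ [x]).count x : Int) = 2) ↔ ((p ++ [x]).count x = 2) := by omega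
  by_cases hc1 : (p ++ [x]).count x = 1 <;> by_cases hc2 : (p ++ [x]).count x = 2 <;>
    simp [h1, h2, hc1, hc2] <;> split_ifs <;> simp_all <;> omega

-- A's inner loop over the remaining elements l, with prefix p already processed
theorem innerA (l : List Int) : ∀ (p : List Int) (s : Int),
    (l.foldl stepA (PySem.Dict.counter p, uq p, s)).2.2 =
      s + ((List.range l.length).map
            (fun m => if uq (p ++ l.take (m + 1)) = 0 then (1 : Int) else 0)).sum := by
  induction l with
  | nil => intro p s; simp
  | cons x l ih =>
    intro p s
    rw [List.foldl_cons, stepA_eq, ih (p ++ [x])]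
    have hre : (List.range (x :: l).length).map
          (fun m => if uq (p ++ (x :: l).take (m + 1)) = 0 then (1 : Int) else 0)
        = (if uq (p ++ [x]) = 0 then (1 : Int) else 0) ::
          (List.range l.length).map
            (fun m => if uq ((p ++ [x]) ++ l.take (m + 1)) = 0 then (1 : Int) else 0) := by
      rw [List.length_cons, List.range_succ_eq_map, List.map_cons, List.map_map]
      congr 1
      apply List.map_congr_left
      intro m _
      simp only [Function.comp, List.take_succ_cons, Nat.succ_eq_add_one]
      simp only [show p ++ x :: l.take (m + 1) = (p ++ [x]) ++ l.take (m + 1) by simp]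
    rw [hre, List.sum_cons]
    ring

-- B's per-subarray test equals "uq u = 0"
theorem cond_iff (u : List Int) :
    ((PySem.Dict.counter u).values.all (fun c => 2 ≤ c)) = true ↔ uq u = 0 := by
  have hv : (PySem.Dict.counter u).values =
      (PySem.Set.ofList u).map (fun k => (u.count k : Int)) := by
    show ((PySem.Dict.counter u).items.map (·.2)) = _
    rw [PySem.Dict.items_counter]; simp
  rw [hv]
  have hfeq : (u.filter (fun y => u.count y = 1)).length = 0 ↔ ∀ y ∈ u, u.count y ≠ 1 := by
    rw [List.length_eq_zero_iff, List.filter_eq_nil_iff]; simp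
  unfold uq
  constructor
  · intro h
    have hlen : (u.filter (fun y => u.count y = 1)).length = 0 := by
      apply hfeq.mpr
      intro y hy
      have h2 : (2 : Int) ≤ (u.count y : Int) := by
        simpa using (List.all_eq_true.mp h) _
          (List.mem_map.mpr ⟨y, (PySem.Set.mem_ofList u y).mpr hy, rfl⟩)
      omega
    exact_mod_cast hlen
  · intro h
    rw [List.all_eq_true]
    intro c hc
    rcases List.mem_map.mp hc with ⟨y, hy, rfl⟩
    have hyu : y ∈ u := (PySem.Set.mem_ofList u y).mp hy
    have hne1 : u.count y ≠ 1 := hfeq.mp (by exact_mod_cast h) y hyu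
    have hpos : 0 < u.count y := List.count_pos_iff.mpr hyu
    simp only [decide_eq_true_eq]
    omega

-- per-start-index equality of the two inner computations
theorem per_i (arr : List Int) (i : Int) (hi0 : 0 ≤ i) (hiN : i < (arr.length : Int)) :
    ∀ s : Int,
    ((PySem.List.pyRange i (arr.length : Int) 1).foldl
        (fun st j => stepA st (PySem.List.pyGetD arr j 0))
        (PySem.Dict.empty, 0, s)).2.2 =
      s + ((PySem.List.pyRange i (arr.length : Int) 1).map (fun j =>
        if ((PySem.Dict.counter (PySem.List.slice arr (some i) (some (j + 1)))).values.all
              (fun c => 2 ≤ c))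
        then (1 : Int) else 0)).sum := by
  intro s
  rw [PySem.List.foldl_pyRange_pyGetD' (xs := arr) (d := 0)
      (f := stepA) (init := (PySem.Dict.empty, (0 : Int), s)) hi0]
  rw [show ((PySem.Dict.empty, (0 : Int), s) : PySem.Dict Int Int × Int × Int) =
      ((PySem.Dict.counter ([] : List Int)), uq [], s) from rfl]
  rw [innerA]
  rw [PySem.List.pyRange_one i (arr.length : Int)]
  have hlen : (arr.drop i.toNat).length = ((arr.length : Int) - i).toNat := by
    rw [List.length_drop]; omega
  rw [hlen, List.map_map]
  congr 1
  congr 1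
  apply List.map_congr_left
  intro k hk
  rw [List.mem_range] at hk
  have hslice : PySem.List.slice arr (some i) (some (i + ((k : Int) + 1))) =
      (arr.drop i.toNat).take (k + 1) := by
    rw [PySem.List.slice_toNat arr hi0 (by omega)]
    congr 1
    omega
  simp only [Function.comp, List.nil_append]
  simp only [show i + (k : Int) + 1 = i + ((k : Int) + 1) from by ring, hslice]
  by_cases hcond : ((PySem.Dict.counter ((arr.drop i.toNat).take (k + 1))).values.all
      (fun c => 2 ≤ c)) = true
  · rw [if_pos ((cond_iff _).mp hcond), if_pos hcond]
  · rw [if_neg (fun h => hcond ((cond_iff _).mpr h)),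
        if_neg (by simpa using hcond)]

-- ===== VERDICT (by name: the statement is the Claim_ definition above) =====
theorem solution_spec : Claim_equal_solution := by
  intro arr _
  unfold Spec_solution solution solution_alt
  rw [PySem.List.foldl_congr_mem (g := fun cntSub i => cntSub +
      ((PySem.List.pyRange i (arr.length : Int) 1).map (fun j =>
        if ((PySem.Dict.counter (PySem.List.slice arr (some i) (some (j + 1)))).values.all
              (fun c => 2 ≤ c))
        then (1 : Int) else 0)).sum)]
  · rw [PySem.List.foldl_add]
    simp
  · intro acc i hi
    rw [PySem.List.mem_pyRange_one] at hi
    exact per_i arr i hi.1 hi.2 acc
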